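-- pv_equiv track=rewrite | github.com/PyrokinesisStudio/bge_python_components | common.py | group_component_args
-- ===== SOURCE A (Python) =====
-- from collections import namedtuple
--
-- ComponentProperty = namedtuple("ComponentProperty", "import_path arg_name")
--
-- COMPONENT_ARG_PREFIX = "$"
--
-- COMPONENT_ARG_SEP = ":"
--
-- def parse_component_arg_name(name):
--     start_import_path = name.find(COMPONENT_ARG_PREFIX) + len(COMPONENT_ARG_PREFIX)
--     end_import_path = name.find(COMPONENT_ARG_SEP)
--     start_arg_name = end_import_path + len(COMPONENT_ARG_SEP)
--
--     if start_import_path == -1 or end_import_path == -1: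
--         raise ValueError
--
--     return ComponentProperty(name[start_import_path:end_import_path], name[start_arg_name:])
--
-- def group_component_args(properties):
--     components = {}
--
--     for name, value in properties.items():
--         try:
--             data = parse_component_arg_name(name)
--         except ValueError:
--             continue
--
--         try:
--             component_data = components[data.import_path]
--         except KeyError:
--             component_data = components[data.import_path] = {}
--
--         component_data[data.arg_name] = value
--
--     return components
-- ===== SOURCE B (Python) =====
-- from collections import namedtuple
--
-- ComponentProperty = namedtuple("ComponentProperty", "import_path arg_name")
--
-- COMPONENT_ARG_PREFIX = "$"
-- COMPONENT_ARG_SEP = ":"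
--
--
-- def parse_component_arg_name(name):
--     start_import_path = name.find(COMPONENT_ARG_PREFIX) + len(COMPONENT_ARG_PREFIX)
--     end_import_path = name.find(COMPONENT_ARG_SEP)
--     start_arg_name = end_import_path + len(COMPONENT_ARG_SEP)
--
--     if start_import_path == -1 or end_import_path == -1:
--         raise ValueError
--
--     return ComponentProperty(name[start_import_path:end_import_path], name[start_arg_name:])
--
--
-- def group_component_args(properties):
--     # Pass 1: flatten to (import_path, arg_name, value) triples, dropping unparsable names.
--     parsed = []
--     for name, value in properties.items():
--         try:
--             data = parse_component_arg_name(name)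
--         except ValueError:
--             continue
--         parsed.append((data.import_path, data.arg_name, value))
--
--     # Pass 2: one dict comprehension per distinct import path (first-occurrence order).
--     components = {}
--     for path, _, _ in parsed:
--         if path not in components:
--             components[path] = {a: v for p, a, v in parsed if p == path}
--     return components
-- ===== Notes on version B (the rewrite author's own statement) =====
-- stated objective: alternative
-- what changed: A builds the nested dicts incrementally, mutating per-path inner dicts while scanning; B first flattens properties into a list of (import_path, arg_name, value) triples, then builds each component's inner dict in one grouping comprehension per distinct import path (first-occurrence order).
import Mathlib
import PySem

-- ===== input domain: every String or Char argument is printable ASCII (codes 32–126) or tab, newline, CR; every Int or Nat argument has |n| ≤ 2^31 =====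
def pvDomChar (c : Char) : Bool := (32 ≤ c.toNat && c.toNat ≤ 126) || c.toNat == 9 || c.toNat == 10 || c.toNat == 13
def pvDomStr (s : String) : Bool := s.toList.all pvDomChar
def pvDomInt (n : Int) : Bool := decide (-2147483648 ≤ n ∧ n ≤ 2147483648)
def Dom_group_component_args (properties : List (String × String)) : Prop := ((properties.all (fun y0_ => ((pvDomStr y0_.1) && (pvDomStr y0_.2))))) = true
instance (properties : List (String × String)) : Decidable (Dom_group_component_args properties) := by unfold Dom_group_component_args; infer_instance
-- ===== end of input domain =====

-- B replaces A's incremental dict-of-dicts update with a flat parse pass followed by one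
-- grouping comprehension per distinct import path (alternative decomposition, same results).


-- ===== PORT A =====
-- parse_component_arg_name: returns some (import_path, arg_name); none = ValueError (caught by both callers)
def pvParse (name : String) : Option (String × String) :=
  let startImportPath : Int := PySem.Str.find name "$" + 1
  let endImportPath : Int := PySem.Str.find name ":"
  let startArgName : Int := endImportPath + 1
  if startImportPath = -1 ∨ endImportPath = -1 then none
  else some (PySem.Str.slice name (some startImportPath) (some endImportPath),
             PySem.Str.slice name (some startArgName) none)

def group_component_args (properties : List (String × String)) : List (String × List (String × String)) :=
  let components : PySem.Dict String (PySem.Dict String String) :=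
    properties.foldl (fun components nv =>
      match pvParse nv.1 with
      | none => components                     -- except ValueError: continue
      | some data =>
        match components.get? data.1 with      -- try components[data.import_path]
        | some component_data => components.insert data.1 (component_data.insert data.2 nv.2)
        | none => components.insert data.1 (PySem.Dict.empty.insert data.2 nv.2))  -- KeyError: fresh {}
      PySem.Dict.empty
  components.items.map (fun kv => (kv.1, kv.2.items))

-- ===== PORT B =====
-- the dict comprehension {a: v for p, a, v in parsed if p == path}
def pvGroupOf (parsed : List (String × String × String)) (path : String) : PySem.Dict String String :=
  (parsed.filter (fun s => s.1 == path)).foldl (fun d s => d.insert s.2.1 s.2.2) PySem.Dict.empty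

def group_component_args_alt (properties : List (String × String)) : List (String × List (String × String)) :=
  let parsed : List (String × String × String) :=
    properties.foldl (fun acc nv =>
      match pvParse nv.1 with
      | none => acc
      | some data => acc ++ [(data.1, data.2, nv.2)]) []
  let components : PySem.Dict String (PySem.Dict String String) :=
    parsed.foldl (fun components t =>
      if components.contains t.1 then components
      else components.insert t.1 (pvGroupOf parsed t.1))
      PySem.Dict.empty
  components.items.map (fun kv => (kv.1, kv.2.items))

-- ===== PRECONDITION & SPEC =====
def Spec_group_component_args (properties : List (String × String)) (out : List (String × List (String × String))) : Prop := out = group_component_args_alt properties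
instance (properties : List (String × String)) (out : List (String × List (String × String))) : Decidable (Spec_group_component_args properties out) := by unfold Spec_group_component_args; infer_instance

-- ===== CLAIM (what is proved, stated in full; the proofs are below) =====
def Claim_equal_group_component_args : Prop := ∀ (properties : List (String × String)), Dom_group_component_args properties → Spec_group_component_args properties (group_component_args properties)

-- ===== LEMMAS AND PROOFS =====

-- the flat list of (import_path, arg_name, value) triples both programs effectively process
def pvParsedOf (properties : List (String × String)) : List (String × String × String) :=
  properties.filterMap (fun nv => (pvParse nv.1).map (fun d => (d.1, d.2, nv.2)))

-- A's loop body on a triple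
def pvStepA (c : PySem.Dict String (PySem.Dict String String)) (t : String × String × String) :
    PySem.Dict String (PySem.Dict String String) :=
  match c.get? t.1 with
  | some d => c.insert t.1 (d.insert t.2.1 t.2.2)
  | none => c.insert t.1 (PySem.Dict.empty.insert t.2.1 t.2.2)

-- first-occurrence-distinct keys of a list, given keys already seen
def pvNewKeys (seen : List String) : List String → List String
  | [] => []
  | p :: ps => if p ∈ seen then pvNewKeys seen ps else p :: pvNewKeys (p :: seen) ps

lemma pvStepA_eq (c : PySem.Dict String (PySem.Dict String String)) (t : String × String × String) :
    pvStepA c t = c.insert t.1 ((c.getD t.1 PySem.Dict.empty).insert t.2.1 t.2.2) := by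
  unfold pvStepA
  rw [PySem.Dict.getD_eq_get?_getD]
  cases h : c.get? t.1 <;> rfl

lemma pvFoldA_parsed (properties : List (String × String))
    (c : PySem.Dict String (PySem.Dict String String)) :
    properties.foldl (fun components nv =>
      match pvParse nv.1 with
      | none => components
      | some data =>
        match components.get? data.1 with
        | some component_data => components.insert data.1 (component_data.insert data.2 nv.2)
        | none => components.insert data.1 (PySem.Dict.empty.insert data.2 nv.2)) c
    = (pvParsedOf properties).foldl pvStepA c := by
  induction properties generalizing c with
  | nil => simp [pvParsedOf]
  | cons nv rest ih =>
    simp only [List.foldl_cons, pvParsedOf, List.filterMap_cons]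
    cases h : pvParse nv.1 with
    | none => exact ih c
    | some d =>
      rw [ih]
      rfl

lemma pvBuild_parsed (properties : List (String × String)) (acc : List (String × String × String)) :
    properties.foldl (fun acc nv =>
      match pvParse nv.1 with
      | none => acc
      | some data => acc ++ [(data.1, data.2, nv.2)]) acc
    = acc ++ pvParsedOf properties := by
  induction properties generalizing acc with
  | nil => simp [pvParsedOf]
  | cons nv rest ih =>
    simp only [List.foldl_cons, pvParsedOf, List.filterMap_cons]
    cases h : pvParse nv.1 with
    | none => exact ih acc
    | some d =>
      rw [ih]
      simp [pvParsedOf, List.append_assoc]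

lemma pvMem_newKeys (q : String) (xs : List String) :
    ∀ seen, q ∈ pvNewKeys seen xs ↔ (q ∉ seen ∧ q ∈ xs) := by
  induction xs with
  | nil => intro seen; simp [pvNewKeys]
  | cons p ps ih =>
    intro seen
    by_cases hp : p ∈ seen
    · rw [pvNewKeys, if_pos hp, ih seen]
      constructor
      · rintro ⟨h1, h2⟩; exact ⟨h1, List.mem_cons_of_mem _ h2⟩
      · rintro ⟨h1, h2⟩
        rcases List.mem_cons.1 h2 with h2 | h2
        · subst h2; exact absurd hp h1
        · exact ⟨h1, h2⟩
    · rw [pvNewKeys, if_neg hp]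
      simp only [List.mem_cons, ih (p :: seen), List.mem_cons]
      by_cases hq : q = p
      · subst hq; simp [hp]
      · simp [hq]

lemma pvNewKeys_congr (s₁ s₂ : List String) (xs : List String)
    (h : ∀ x, x ∈ s₁ ↔ x ∈ s₂) : pvNewKeys s₁ xs = pvNewKeys s₂ xs := by
  induction xs generalizing s₁ s₂ with
  | nil => simp [pvNewKeys]
  | cons p ps ih =>
    by_cases hp : p ∈ s₁
    · have hp2 : p ∈ s₂ := (h p).1 hp
      rw [pvNewKeys, if_pos hp, pvNewKeys, if_pos hp2]
      exact ih _ _ h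
    · have hp2 : p ∉ s₂ := fun m => hp ((h p).2 m)
      rw [pvNewKeys, if_neg hp, pvNewKeys, if_neg hp2]
      exact congrArg _ (ih _ _ (fun x => by simp [h x]))

lemma pvNewKeys_append_singleton (xs : List String) (p : String) :
    ∀ seen, pvNewKeys seen (xs ++ [p]) =
      pvNewKeys seen xs ++ (if p ∈ seen ∨ p ∈ xs then [] else [p]) := by
  induction xs with
  | nil =>
    intro seen
    by_cases hp : p ∈ seen <;> simp [pvNewKeys, hp]
  | cons x xs ih =>
    intro seen
    by_cases hx : x ∈ seen
    · have hiff : (p ∈ seen ∨ p ∈ x :: xs) ↔ (p ∈ seen ∨ p ∈ xs) := by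
        have hpx : p = x → p ∈ seen := fun e => e ▸ hx
        simp only [List.mem_cons]; tauto
      rw [List.cons_append, pvNewKeys, if_pos hx, pvNewKeys, if_pos hx, ih seen]
      by_cases hc : p ∈ seen ∨ p ∈ xs
      · rw [if_pos hc, if_pos (hiff.2 hc)]
      · rw [if_neg hc, if_neg (fun m => hc (hiff.1 m))]
    · have hiff : (p ∈ seen ∨ p ∈ x :: xs) ↔ (p ∈ x :: seen ∨ p ∈ xs) := by
        simp only [List.mem_cons]; tauto
      rw [List.cons_append, pvNewKeys, if_neg hx, pvNewKeys, if_neg hx, ih (x :: seen)]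
      by_cases hc : p ∈ x :: seen ∨ p ∈ xs
      · rw [if_pos hc, if_pos (hiff.2 hc)]; simp
      · rw [if_neg hc, if_neg (fun m => hc (hiff.1 m))]; simp

lemma pvGroupOf_append_singleton (M : List (String × String × String))
    (t : String × String × String) (p : String) :
    pvGroupOf (M ++ [t]) p =
      if t.1 = p then (pvGroupOf M p).insert t.2.1 t.2.2 else pvGroupOf M p := by
  unfold pvGroupOf
  rw [List.filter_append, List.foldl_append]
  by_cases h : t.1 = p
  · simp [h]
  · have hb : (t.1 == p) = false := by simp [h]
    simp [List.filter, hb, h]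

lemma pvGroupOf_of_not_mem (M : List (String × String × String)) (p : String)
    (h : p ∉ M.map (·.1)) : pvGroupOf M p = PySem.Dict.empty := by
  have hf : M.filter (fun s => s.1 == p) = [] := by
    apply List.filter_eq_nil_iff.mpr
    intro a ha
    simp only [beq_iff_eq]
    intro e
    exact h (e ▸ List.mem_map_of_mem ha)
  simp [pvGroupOf, hf]

lemma pvGet?_mk_map (ks : List String) (f : String → PySem.Dict String String) (q : String) :
    (PySem.Dict.mk (ks.map (fun p => (p, f p)))).get? q = if q ∈ ks then some (f q) else none := by
  induction ks with
  | nil => simp [PySem.Dict.get?]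
  | cons k ks ih =>
    rw [List.map_cons, PySem.Dict.get?_mk_cons]
    by_cases h : k = q
    · subst h; simp
    · simp only [List.mem_cons]
      have : (k == q) = false := by simp [h]
      simp [this, Ne.symm h, ih]

-- A's fold computes the grouped normal form
lemma pvFoldA_spec (L : List (String × String × String)) :
    L.foldl pvStepA PySem.Dict.empty
    = PySem.Dict.mk ((pvNewKeys [] (L.map (·.1))).map (fun p => (p, pvGroupOf L p))) := by
  induction L using List.reverseRecOn with
  | nil => rfl
  | append_singleton M t ih =>
    rw [List.foldl_append, List.foldl_cons, List.foldl_nil, ih, pvStepA_eq]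
    rw [List.map_append, List.map_cons, List.map_nil, pvNewKeys_append_singleton]
    simp only [List.not_mem_nil, false_or]
    by_cases hp : t.1 ∈ M.map (·.1)
    · have hmem : t.1 ∈ pvNewKeys [] (M.map (·.1)) :=
        (pvMem_newKeys _ _ _).2 ⟨List.not_mem_nil, hp⟩
      have hget : (PySem.Dict.mk ((pvNewKeys [] (M.map (·.1))).map
          (fun p => (p, pvGroupOf M p)))).get? t.1 = some (pvGroupOf M t.1) := by
        rw [pvGet?_mk_map]; simp [hmem]
      have hc : (PySem.Dict.mk ((pvNewKeys [] (M.map (·.1))).map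
          (fun p => (p, pvGroupOf M p)))).contains t.1 = true := by
        rw [PySem.Dict.contains_eq_isSome_get?, hget]; rfl
      have hgetD : (PySem.Dict.mk ((pvNewKeys [] (M.map (·.1))).map
          (fun p => (p, pvGroupOf M p)))).getD t.1 PySem.Dict.empty = pvGroupOf M t.1 := by
        rw [PySem.Dict.getD_eq_get?_getD, hget]; rfl
      rw [hgetD, if_pos hp, List.append_nil]
      have hitems := PySem.Dict.items_insert_of_contains
        (PySem.Dict.mk ((pvNewKeys [] (M.map (·.1))).map (fun p => (p, pvGroupOf M p))))
        ((pvGroupOf M t.1).insert t.2.1 t.2.2) hc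
      calc _ = PySem.Dict.mk (((PySem.Dict.mk ((pvNewKeys [] (M.map (·.1))).map
              (fun p => (p, pvGroupOf M p)))).insert t.1
              ((pvGroupOf M t.1).insert t.2.1 t.2.2)).items) := rfl
        _ = _ := by
            rw [hitems]
            congr 1
            show ((pvNewKeys [] (M.map (·.1))).map (fun p => (p, pvGroupOf M p))).map _ = _
            rw [List.map_map]
            apply List.map_congr_left
            intro q hq
            by_cases hqt : q = t.1
            · subst hqt
              simp [pvGroupOf_append_singleton, Function.comp]
            · have : (q == t.1) = false := by simp [hqt]
              simp [Function.comp, this, pvGroupOf_append_singleton, Ne.symm hqt]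
    · have hmem : t.1 ∉ pvNewKeys [] (M.map (·.1)) := fun m =>
        hp ((pvMem_newKeys _ _ _).1 m).2
      have hget : (PySem.Dict.mk ((pvNewKeys [] (M.map (·.1))).map
          (fun p => (p, pvGroupOf M p)))).get? t.1 = none := by
        rw [pvGet?_mk_map]; simp [hmem]
      have hc : (PySem.Dict.mk ((pvNewKeys [] (M.map (·.1))).map
          (fun p => (p, pvGroupOf M p)))).contains t.1 = false := by
        rw [PySem.Dict.contains_eq_isSome_get?, hget]; rfl
      have hgetD : (PySem.Dict.mk ((pvNewKeys [] (M.map (·.1))).map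
          (fun p => (p, pvGroupOf M p)))).getD t.1 PySem.Dict.empty = PySem.Dict.empty := by
        rw [PySem.Dict.getD_eq_get?_getD, hget]; rfl
      rw [hgetD, if_neg hp]
      have hitems := PySem.Dict.items_insert_of_not_contains
        (PySem.Dict.mk ((pvNewKeys [] (M.map (·.1))).map (fun p => (p, pvGroupOf M p))))
        (PySem.Dict.empty.insert t.2.1 t.2.2) hc
      calc _ = PySem.Dict.mk (((PySem.Dict.mk ((pvNewKeys [] (M.map (·.1))).map
              (fun p => (p, pvGroupOf M p)))).insert t.1
              (PySem.Dict.empty.insert t.2.1 t.2.2)).items) := rfl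
        _ = _ := by
            rw [hitems]
            congr 1
            rw [List.map_append, List.map_cons, List.map_nil]
            congr 1
            · apply List.map_congr_left
              intro q hq
              have hq' : q ∈ M.map (·.1) := ((pvMem_newKeys _ _ _).1 hq).2
              have hqt : q ≠ t.1 := fun e => hp (e ▸ hq')
              rw [pvGroupOf_append_singleton, if_neg (Ne.symm hqt)]
            · rw [pvGroupOf_append_singleton, if_pos rfl, pvGroupOf_of_not_mem M t.1 hp]

-- B's outer fold with a fixed group function G
lemma pvFoldB_spec (G : String → PySem.Dict String String)
    (L : List (String × String × String)) :
    ∀ c : PySem.Dict String (PySem.Dict String String),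
    L.foldl (fun components t =>
      if components.contains t.1 then components
      else components.insert t.1 (G t.1)) c
    = PySem.Dict.mk (c.items ++ (pvNewKeys c.keys (L.map (·.1))).map (fun p => (p, G p))) := by
  induction L with
  | nil =>
    intro c
    simp only [List.foldl_nil, List.map_nil, pvNewKeys, List.append_nil]
  | cons t L ih =>
    intro c
    rw [List.foldl_cons]
    by_cases h : c.contains t.1 = true
    · have hk : t.1 ∈ c.keys := (PySem.Dict.contains_iff_mem_keys _ _).1 h
      rw [if_pos h, ih]
      rw [List.map_cons, pvNewKeys, if_pos hk]
    · have h' : c.contains t.1 = false := eq_false_of_ne_true h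
      have hk : t.1 ∉ c.keys := fun m => h ((PySem.Dict.contains_iff_mem_keys _ _).2 m)
      rw [if_neg h, ih]
      congr 1
      rw [PySem.Dict.items_insert_of_not_contains _ _ h',
          PySem.Dict.keys_insert_of_not_contains _ _ h',
          List.map_cons, pvNewKeys, if_neg hk]
      rw [pvNewKeys_congr (c.keys ++ [t.1]) (t.1 :: c.keys) _ (fun x => by simp [or_comm])]
      simp [List.append_assoc]

-- ===== VERDICT (by name: the statement is the Claim_ definition above) =====
theorem group_component_args_spec : Claim_equal_group_component_args := by
  intro properties _
  unfold Spec_group_component_args group_component_args group_component_args_alt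
  rw [pvFoldA_parsed, pvBuild_parsed]
  simp only [List.nil_append]
  rw [pvFoldA_spec, pvFoldB_spec]
  simp only [PySem.Dict.keys_empty]
  rfl
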